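-- pv_equiv track=rewrite | github.com/fdgrock/gaming-ai-bot | streamlit_app/utils/page_analyzer.py | _calculate_priority
-- ===== SOURCE A (Python) =====
-- from typing import Dict, List, Any, Optional
--
-- def _calculate_priority(issues: List[str]) -> int:
--     """Calculate priority score for fixes."""
--     priority = 0
--
--     for issue in issues:
--         if "Missing standard render_page()" in issue:
--             priority += 10  # Highest priority
--         elif "old function name" in issue:
--             priority += 8   # High priority
--         elif "Missing standard error handling" in issue:
--             priority += 7   # High priority
--         elif "Missing standard import" in issue:
--             priority += 5   # Medium priority
--         elif "Missing expected parameters" in issue: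
--             priority += 6   # Medium-high priority
--         elif "Missing logging" in issue:
--             priority += 3   # Lower priority
--
--     return priority
-- ===== SOURCE B (Python) =====
-- _PRIORITY_TABLE = [
--     ("Missing standard render_page()", 10),
--     ("old function name", 8),
--     ("Missing standard error handling", 7),
--     ("Missing standard import", 5),
--     ("Missing expected parameters", 6),
--     ("Missing logging", 3),
-- ]
--
-- def _calculate_priority(issues):
--     # Pattern-major sweep: for each pattern in priority order, score all still-unclaimed
--     # issues that contain it, then drop them from the pool (first-match-wins preserved).
--     remaining = list(issues)
--     priority = 0
--     for sub, weight in _PRIORITY_TABLE: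
--         priority += weight * sum(1 for issue in remaining if sub in issue)
--         remaining = [issue for issue in remaining if sub not in issue]
--     return priority
-- ===== Notes on version B (the rewrite author's own statement) =====
-- stated objective: alternative
-- what changed: Inverts the loop nesting: instead of scanning each issue through an if/elif chain, B sweeps pattern-by-pattern over a shrinking pool of unclaimed issues, adding weight*count per pattern and filtering matched issues out, which preserves first-match-wins.
import Mathlib
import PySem

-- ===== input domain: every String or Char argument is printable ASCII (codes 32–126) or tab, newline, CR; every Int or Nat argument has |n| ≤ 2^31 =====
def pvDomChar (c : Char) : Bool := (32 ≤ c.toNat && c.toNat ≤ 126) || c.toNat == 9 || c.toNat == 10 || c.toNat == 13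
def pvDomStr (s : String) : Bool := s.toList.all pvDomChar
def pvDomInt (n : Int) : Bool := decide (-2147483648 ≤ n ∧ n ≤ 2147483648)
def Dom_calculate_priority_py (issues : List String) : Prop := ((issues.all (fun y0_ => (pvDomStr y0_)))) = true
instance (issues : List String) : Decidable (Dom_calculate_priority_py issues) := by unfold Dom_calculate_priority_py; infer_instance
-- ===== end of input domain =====

-- B inverts the loop nesting: a pattern-major sweep over a shrinking pool of unclaimed issues (alternative decomposition, same cost).
-- ===== PORT A =====
def calculate_priority_py (issues : List String) : Int :=
  issues.foldl (fun priority issue =>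
    if PySem.Str.isIn "Missing standard render_page()" issue then priority + 10
    else if PySem.Str.isIn "old function name" issue then priority + 8
    else if PySem.Str.isIn "Missing standard error handling" issue then priority + 7
    else if PySem.Str.isIn "Missing standard import" issue then priority + 5
    else if PySem.Str.isIn "Missing expected parameters" issue then priority + 6
    else if PySem.Str.isIn "Missing logging" issue then priority + 3
    else priority) 0

-- ===== PORT B =====
def pvPriorityTable : List (String × Int) :=
  [("Missing standard render_page()", 10), ("old function name", 8),
   ("Missing standard error handling", 7), ("Missing standard import", 5),
   ("Missing expected parameters", 6), ("Missing logging", 3)]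

-- pattern-major sweep: state = (remaining pool, priority); per pattern add weight*count, filter matches out
def pvSweep : List (String × Int) → List String → Int → Int
  | [], _, priority => priority
  | (sub, w) :: rest, remaining, priority =>
      pvSweep rest (remaining.filter (fun issue => !PySem.Str.isIn sub issue))
        (priority + w * (remaining.countP (fun issue => PySem.Str.isIn sub issue) : Int))

def calculate_priority_py_alt (issues : List String) : Int :=
  pvSweep pvPriorityTable issues 0

-- ===== PRECONDITION & SPEC =====
def Spec_calculate_priority_py (issues : List String) (out : Int) : Prop := out = calculate_priority_py_alt issues
instance (issues : List String) (out : Int) : Decidable (Spec_calculate_priority_py issues out) := by unfold Spec_calculate_priority_py; infer_instance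

-- ===== CLAIM (what is proved, stated in full; the proofs are below) =====
def Claim_equal_calculate_priority_py : Prop := ∀ (issues : List String), Dom_calculate_priority_py issues → Spec_calculate_priority_py issues (calculate_priority_py issues)

-- ===== LEMMAS AND PROOFS =====

-- first-match weight of one issue over a table (proof-only helper)
def pvFW : List (String × Int) → String → Int
  | [], _ => 0
  | (sub, w) :: rest, issue => if PySem.Str.isIn sub issue then w else pvFW rest issue

theorem pvSweep_shift (t : List (String × Int)) (rem : List String) (p c : Int) :
    pvSweep t rem (p + c) = pvSweep t rem p + c := by
  induction t generalizing rem p with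
  | nil => rfl
  | cons hd rest ih =>
    obtain ⟨sub, w⟩ := hd
    simp only [pvSweep]
    rw [show p + c + w * (rem.countP (fun issue => PySem.Str.isIn sub issue) : Int)
        = (p + w * (rem.countP (fun issue => PySem.Str.isIn sub issue) : Int)) + c by ring, ih]

theorem pvSweep_cons (t : List (String × Int)) (x : String) (xs : List String) (p : Int) :
    pvSweep t (x :: xs) p = pvSweep t xs (p + pvFW t x) := by
  induction t generalizing xs p with
  | nil => simp [pvSweep, pvFW]
  | cons hd rest ih =>
    obtain ⟨sub, w⟩ := hd
    simp only [pvSweep, pvFW, List.countP_cons, List.filter_cons]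
    by_cases h : PySem.Str.isIn sub x
    · simp only [h, if_true, Bool.not_true, if_neg (Bool.false_ne_true)]
      congr 1
      push_cast
      ring
    · simp only [h, Bool.not_false, if_neg (Bool.false_ne_true), Nat.add_zero, if_true]
      rw [ih]
      congr 1
      ring

theorem pvSweep_eq_sum_fw (t : List (String × Int)) (issues : List String) :
    pvSweep t issues 0 = (issues.map (pvFW t)).sum := by
  induction issues with
  | nil => induction t with
    | nil => rfl
    | cons hd rest ih => obtain ⟨sub, w⟩ := hd; simpa [pvSweep] using ih
  | cons x xs ih =>
    rw [pvSweep_cons, zero_add, List.map_cons, List.sum_cons,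
        show pvFW t x = 0 + pvFW t x by ring, pvSweep_shift, ih]
    ring

theorem pv_foldl_eq_sum (issues : List String) (acc : Int) :
    issues.foldl (fun priority issue =>
      if PySem.Str.isIn "Missing standard render_page()" issue then priority + 10
      else if PySem.Str.isIn "old function name" issue then priority + 8
      else if PySem.Str.isIn "Missing standard error handling" issue then priority + 7
      else if PySem.Str.isIn "Missing standard import" issue then priority + 5
      else if PySem.Str.isIn "Missing expected parameters" issue then priority + 6
      else if PySem.Str.isIn "Missing logging" issue then priority + 3
      else priority) acc = acc + (issues.map (pvFW pvPriorityTable)).sum := by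
  induction issues generalizing acc with
  | nil => simp
  | cons x xs ih =>
    simp only [List.foldl_cons, List.map_cons, List.sum_cons, ih]
    simp only [pvPriorityTable, pvFW]
    split_ifs <;> ring

-- ===== VERDICT (by name: the statement is the Claim_ definition above) =====
theorem calculate_priority_py_spec : Claim_equal_calculate_priority_py := by
  intro issues _
  unfold Spec_calculate_priority_py calculate_priority_py calculate_priority_py_alt
  rw [pvSweep_eq_sum_fw]
  simpa using pv_foldl_eq_sum issues 0
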